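-- pv_equiv track=rewrite | github.com/kunal0011/myWorksSpace | python/src/Amazon/737sentencesimilarityiii.py | areSentencesSimilarTwo
-- ===== SOURCE A (Python) =====
-- from collections import defaultdict
-- from typing import List
--
-- class UnionFind:
--     def __init__(self):
--         self.parent = {}
--         self.rank = defaultdict(int)  # Added rank for optimization
--
--     def find(self, word: str) -> str:
--         if word not in self.parent:
--             self.parent[word] = word
--         if word != self.parent[word]:
--             self.parent[word] = self.find(self.parent[word])
--         return self.parent[word]
--
--     def union(self, word1: str, word2: str) -> None:
--         root1, root2 = self.find(word1), self.find(word2)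
--         if root1 != root2:
--             # Union by rank
--             if self.rank[root1] < self.rank[root2]:
--                 root1, root2 = root2, root1
--             self.parent[root2] = root1
--             if self.rank[root1] == self.rank[root2]:
--                 self.rank[root1] += 1
--
-- def areSentencesSimilarTwo(words1: List[str], words2: List[str], pairs: List[List[str]]) -> bool:
--     # Early return for empty or mismatched sentences
--     if len(words1) != len(words2):
--         return False
--     if not words1 and not words2:
--         return True
--     if words1 == words2:
--         return True
--
--     uf = UnionFind()
--
--     # Build the similarity groups
--     for word1, word2 in pairs:
--         uf.union(word1, word2)
--
--     # Check if corresponding words are similar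
--     return all(uf.find(w1) == uf.find(w2) for w1, w2 in zip(words1, words2))
-- ===== SOURCE B (Python) =====
-- def areSentencesSimilarTwo(words1, words2, pairs):
--     if len(words1) != len(words2):
--         return False
--     if not words1 and not words2:
--         return True
--     if words1 == words2:
--         return True
--     # quick-find: map each word seen in pairs to a class label;
--     # merging a pair relabels one whole class in a single sweep
--     comp = {}
--     for w1, w2 in pairs:
--         a = comp.get(w1, w1)
--         b = comp.get(w2, w2)
--         if a != b:
--             comp = {k: (a if v == b else v) for k, v in comp.items()}
--         comp[w1] = a
--         comp[w2] = a
--     return all(x == y or (comp.get(x) is not None and comp.get(x) == comp.get(y))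
--                for x, y in zip(words1, words2))
-- ===== Notes on version B (the rewrite author's own statement) =====
-- stated objective: alternative
-- what changed: Replaces the rank/path-compression union-find (recursive find over a parent forest) by a quick-find label dictionary: each merge relabels the absorbed class in one sweep, and the final check is plain dictionary lookups with no mutation.
import Mathlib
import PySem

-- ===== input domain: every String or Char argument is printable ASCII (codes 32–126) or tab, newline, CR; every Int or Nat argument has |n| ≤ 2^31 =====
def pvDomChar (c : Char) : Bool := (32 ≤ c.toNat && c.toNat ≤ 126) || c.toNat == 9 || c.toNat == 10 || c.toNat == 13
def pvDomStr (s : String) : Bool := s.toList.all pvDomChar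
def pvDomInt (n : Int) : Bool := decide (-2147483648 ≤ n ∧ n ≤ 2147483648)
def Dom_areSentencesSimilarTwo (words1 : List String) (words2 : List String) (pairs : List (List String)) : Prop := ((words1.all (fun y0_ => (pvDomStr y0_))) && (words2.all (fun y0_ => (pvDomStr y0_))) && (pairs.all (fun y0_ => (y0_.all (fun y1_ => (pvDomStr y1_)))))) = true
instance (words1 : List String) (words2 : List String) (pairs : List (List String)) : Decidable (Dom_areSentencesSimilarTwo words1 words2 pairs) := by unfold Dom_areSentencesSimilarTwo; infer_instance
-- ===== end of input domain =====

-- B replaces A's rank/path-compression union-find by a quick-find label dictionary (one relabel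
-- sweep per merged pair, plain lookups at the end): an alternative algorithm, no speed claim.

-- ===== PORT A =====
-- UnionFind.find (recursive, with path compression); the recursion is ported with a fuel
-- guard, fuel = parent.size + 1, which always suffices (chain-length bound min_chain below).
def findAux : Nat → PySem.Dict String String → String → String × PySem.Dict String String
  | 0, p, w => (w, p)
  | fu+1, p, w =>
    let p1 := if p.contains w then p else p.insert w w   -- if word not in self.parent: self.parent[word] = word
    let pw := p1.getD w w                                -- self.parent[word]
    if w ≠ pw then
      let res := findAux fu p1 pw                        -- self.find(self.parent[word])
      let p3 := res.2.insert w res.1                     -- self.parent[word] = self.find(...)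
      (p3.getD w w, p3)                                  -- return self.parent[word]
    else (pw, p1)

def ufFind (p : PySem.Dict String String) (w : String) : String × PySem.Dict String String :=
  findAux (p.size + 1) p w

-- UnionFind.union; state = (parent, rank); rank is a defaultdict(int), read as getD _ 0
def ufUnion (st : PySem.Dict String String × PySem.Dict String Int) (x y : String) :
    PySem.Dict String String × PySem.Dict String Int :=
  let f1 := ufFind st.1 x
  let f2 := ufFind f1.2 y
  let r1 := f1.1
  let r2 := f2.1
  if r1 ≠ r2 then
    let rr := if st.2.getD r1 0 < st.2.getD r2 0 then (r2, r1) else (r1, r2)   -- root1, root2 = root2, root1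
    let p3 := f2.2.insert rr.2 rr.1                                           -- self.parent[root2] = root1
    let rk := if st.2.getD rr.1 0 = st.2.getD rr.2 0 then st.2.insert rr.1 (st.2.getD rr.1 0 + 1) else st.2
    (p3, rk)
  else (f2.2, st.2)

-- all(uf.find(w1) == uf.find(w2) ...): short-circuiting, threading the mutated parent dict
def checkAll : PySem.Dict String String → List (String × String) → Bool
  | _, [] => true
  | p, (x, y) :: rest =>
    let f1 := ufFind p x
    let f2 := ufFind f1.2 y
    if f1.1 == f2.1 then checkAll f2.2 rest else false

def areSentencesSimilarTwo (words1 : List String) (words2 : List String) (pairs : List (List String)) : Bool :=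
  if words1.length ≠ words2.length then false
  else if words1 = [] ∧ words2 = [] then true
  else if words1 = words2 then true
  else
    let st := pairs.foldl (fun st pr => match pr with
      | [a, b] => ufUnion st a b
      | _ => st            -- a pair not of length 2 raises ValueError in Python: excluded by Pre_
      ) (PySem.Dict.empty, PySem.Dict.empty)
    checkAll st.1 (words1.zip words2)

-- ===== PORT B =====
-- quick-find merge: relabel the whole class carrying w2's label to w1's label in one sweep
def mergeStep (c : PySem.Dict String String) (x y : String) : PySem.Dict String String :=
  let a := c.getD x x                                    -- comp.get(w1, w1)
  let b := c.getD y y                                    -- comp.get(w2, w2)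
  let c1 := if a ≠ b then
      c.items.foldl (fun d kv => d.insert kv.1 (if kv.2 == b then a else kv.2)) PySem.Dict.empty
    else c                                               -- {k: (a if v == b else v) for k, v in comp.items()}
  (c1.insert x a).insert y a                             -- comp[w1] = a; comp[w2] = a

def areSentencesSimilarTwo_alt (words1 : List String) (words2 : List String) (pairs : List (List String)) : Bool :=
  if words1.length ≠ words2.length then false
  else if words1 = [] ∧ words2 = [] then true
  else if words1 = words2 then true
  else
    let comp := pairs.foldl (fun c pr => match pr with
      | [] => c            -- a pair not of length 2 raises ValueError in Python: excluded by Pre_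
      | x :: t => (match t with
        | [] => c
        | y :: u => (match u with
          | [] => mergeStep c x y
          | _ :: _ => c))
      ) PySem.Dict.empty
    (words1.zip words2).all (fun q =>
      q.1 == q.2 ||
        (match comp.get? q.1, comp.get? q.2 with
         | some lx, some ly => lx == ly
         | _, _ => false))

-- ===== PRECONDITION & SPEC =====
-- Pre_ excludes only inputs where Python raises: a sublist of pairs that is not of length 2 makes
-- the unpacking 'for word1, word2 in pairs' raise ValueError (in A and in B alike) whenever the
-- three early-return guards do not fire first.
def Pre_areSentencesSimilarTwo (words1 : List String) (words2 : List String) (pairs : List (List String)) : Prop :=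
  words1.length = words2.length → words1 ≠ words2 → ∀ pr ∈ pairs, pr.length = 2
instance (words1 : List String) (words2 : List String) (pairs : List (List String)) : Decidable (Pre_areSentencesSimilarTwo words1 words2 pairs) := by unfold Pre_areSentencesSimilarTwo; infer_instance
def pvWitness_areSentencesSimilarTwo : List String × List String × List (List String) :=
  (["a", "c"], ["b", "d"], [["a", "b"], ["c", "d"]])
def Spec_areSentencesSimilarTwo (words1 : List String) (words2 : List String) (pairs : List (List String)) (out : Bool) : Prop := out = areSentencesSimilarTwo_alt words1 words2 pairs
instance (words1 : List String) (words2 : List String) (pairs : List (List String)) (out : Bool) : Decidable (Spec_areSentencesSimilarTwo words1 words2 pairs out) := by unfold Spec_areSentencesSimilarTwo; infer_instance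

-- ===== CLAIM (what is proved, stated in full; the proofs are below) =====
def Claim_equal_areSentencesSimilarTwo : Prop := ∀ (words1 : List String) (words2 : List String) (pairs : List (List String)), Dom_areSentencesSimilarTwo words1 words2 pairs → Pre_areSentencesSimilarTwo words1 words2 pairs → Spec_areSentencesSimilarTwo words1 words2 pairs (areSentencesSimilarTwo words1 words2 pairs)

-- ===== LEMMAS AND PROOFS =====

-- the label/pointer function of a parent or label dict: absent words point to themselves
def wlab (p : PySem.Dict String String) : String → String := fun x => p.getD x x

-- r is the root of x under pointer function f
def Root (f : String → String) (x r : String) : Prop := (∃ n, f^[n] x = r) ∧ f r = r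

def SameRoot (f : String → String) (x y : String) : Prop := ∃ r, Root f x r ∧ Root f y r

-- every word reaches a root (invariant of A's parent dict)
def WFr (f : String → String) : Prop := ∀ x, ∃ r, Root f x r

-- every stored label is itself a key (invariant of B's label dict)
def VKc (c : PySem.Dict String String) : Prop := ∀ k v, c.get? k = some v → c.contains v = true

-- pointwise dict update, as a function
def updf (f : String → String) (k v : String) : String → String := fun x => if x = k then v else f x

-- the joint invariant between A's parent forest and B's label map
def InvPC (p : PySem.Dict String String) (c : PySem.Dict String String) : Prop :=
  WFr (wlab p) ∧ VKc c ∧ c.keys.Nodup ∧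
    ∀ u v, SameRoot (wlab p) u v ↔ wlab c u = wlab c v

theorem root_self (f : String → String) (x : String) (h : f x = x) : Root f x x := ⟨⟨0, rfl⟩, h⟩

theorem root_unique (f : String → String) (x r s : String) (hr : Root f x r) (hs : Root f x s) : r = s := by
  obtain ⟨⟨n, hn⟩, hfr⟩ := hr
  obtain ⟨⟨m, hm⟩, hfs⟩ := hs
  rcases le_total n m with h | h
  · have e : f^[m] x = r := by
      have e2 := Function.iterate_add_apply f (m - n) n x
      rw [Nat.sub_add_cancel h] at e2
      rw [e2, hn, Function.iterate_fixed hfr]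
    rw [hm] at e; exact e.symm
  · have e : f^[n] x = s := by
      have e2 := Function.iterate_add_apply f (n - m) m x
      rw [Nat.sub_add_cancel h] at e2
      rw [e2, hm, Function.iterate_fixed hfs]
    rw [hn] at e; exact e

theorem root_pre (f : String → String) (x r : String) (h : Root f (f x) r) : Root f x r := by
  obtain ⟨⟨n, hn⟩, hfr⟩ := h
  exact ⟨⟨n + 1, by rw [Function.iterate_succ_apply]; exact hn⟩, hfr⟩

theorem comp_root_mp (f : String → String) (w r : String) (hr : Root f w r) (x s : String)
    (h : Root f x s) : Root (updf f w r) x s := by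
  obtain ⟨⟨n, hn⟩, hfs⟩ := h
  induction n generalizing x with
  | zero =>
    simp only [Function.iterate_zero, id_eq] at hn
    subst hn
    by_cases hxw : x = w
    · have hr' : Root f x r := by rw [hxw]; exact hr
      have hrx : r = x := root_unique f x r x hr' (root_self f x hfs)
      refine root_self _ x ?_
      simp [updf, hxw, hrx]
    · refine root_self _ x ?_
      simp [updf, hxw, hfs]
  | succ m ih =>
    by_cases hxw : x = w
    · have hs' : Root f x s := ⟨⟨m + 1, hn⟩, hfs⟩
      have hr' : Root f x r := by rw [hxw]; exact hr
      have hsr : s = r := root_unique f x s r hs' hr'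
      refine ⟨⟨1, ?_⟩, ?_⟩
      · simp [updf, hxw, hsr]
      · show updf f w r s = s
        by_cases hrw : s = w
        · simp only [updf, if_pos hrw]; exact hsr.symm
        · simp only [updf, if_neg hrw]; exact hfs
    · rw [Function.iterate_succ_apply] at hn
      have hstep : Root (updf f w r) (f x) s := ih (f x) hn
      have e : updf f w r x = f x := by simp [updf, hxw]
      exact root_pre _ x s (by rwa [e])

theorem comp_root_mpr (f : String → String) (w r : String) (hr : Root f w r) (x s : String)
    (h : Root (updf f w r) x s) : Root f x s := by
  obtain ⟨⟨n, hn⟩, hfs⟩ := h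
  induction n generalizing x with
  | zero =>
    simp only [Function.iterate_zero, id_eq] at hn
    subst hn
    by_cases hxw : x = w
    · have hfs' : r = x := by simpa [updf, hxw] using hfs
      have hrw : r = w := hfs'.trans hxw
      rw [hrw] at hr
      rw [hxw]; exact hr
    · exact root_self f x (by simpa [updf, hxw] using hfs)
  | succ m ih =>
    rw [Function.iterate_succ_apply] at hn
    by_cases hxw : x = w
    · have hfx : updf f w r x = r := by simp [updf, hxw]
      rw [hfx] at hn
      have hrs : Root f r s := ih r hn
      have hsr : s = r := root_unique f r s r hrs (root_self f r hr.2)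
      rw [hxw, hsr]; exact hr
    · have e : updf f w r x = f x := by simp [updf, hxw]
      rw [e] at hn
      exact root_pre f x s (ih (f x) hn)

theorem comp_root_iff (f : String → String) (w r : String) (hr : Root f w r) (x s : String) :
    Root (updf f w r) x s ↔ Root f x s :=
  ⟨comp_root_mpr f w r hr x s, comp_root_mp f w r hr x s⟩

theorem linkA (f : String → String) (a b : String) (hb : f b = b) (x s : String)
    (h : Root f x s) (hsb : s ≠ b) : Root (updf f b a) x s := by
  obtain ⟨⟨n, hn⟩, hfs⟩ := h
  induction n generalizing x with
  | zero =>
    simp only [Function.iterate_zero, id_eq] at hn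
    subst hn
    exact root_self _ x (by simp [updf, hsb, hfs])
  | succ m ih =>
    rw [Function.iterate_succ_apply] at hn
    by_cases hxb : x = b
    · have h1 : Root f x s := ⟨⟨m + 1, by rw [Function.iterate_succ_apply]; exact hn⟩, hfs⟩
      have h2 : Root f x x := by rw [hxb]; exact root_self f b hb
      have := root_unique f x s x h1 h2
      exact absurd (this.trans hxb) hsb
    · have e : updf f b a x = f x := by simp [updf, hxb]
      exact root_pre _ x s (by rw [e]; exact ih (f x) hn)

theorem linkB (f : String → String) (a b : String) (ha : f a = a) (hab : a ≠ b) (x : String)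
    (h : Root f x b) : Root (updf f b a) x a := by
  obtain ⟨⟨n, hn⟩, hfs⟩ := h
  induction n generalizing x with
  | zero =>
    simp only [Function.iterate_zero, id_eq] at hn
    subst hn
    exact ⟨⟨1, by simp [updf]⟩, by simp [updf, hab, ha]⟩
  | succ m ih =>
    by_cases hxb : x = b
    · refine ⟨⟨1, by simp [updf, hxb]⟩, by simp [updf, hab, ha]⟩
    · rw [Function.iterate_succ_apply] at hn
      have e : updf f b a x = f x := by simp [updf, hxb]
      exact root_pre _ x a (by rw [e]; exact ih (f x) hn)

theorem linkC (f : String → String) (a b : String) (ha : f a = a) (hb : f b = b) (hab : a ≠ b)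
    (x s : String) (h : Root (updf f b a) x s) :
    (Root f x s ∧ s ≠ b) ∨ (Root f x b ∧ s = a) := by
  obtain ⟨⟨n, hn⟩, hfs⟩ := h
  induction n generalizing x with
  | zero =>
    simp only [Function.iterate_zero, id_eq] at hn
    subst hn
    by_cases hxb : x = b
    · have : updf f b a x = a := by simp [updf, hxb]
      rw [this] at hfs
      exact absurd (hfs.trans hxb) hab
    · left
      exact ⟨root_self f x (by simpa [updf, hxb] using hfs), hxb⟩
  | succ m ih =>
    rw [Function.iterate_succ_apply] at hn
    by_cases hxb : x = b
    · have hfx : updf f b a x = a := by simp [updf, hxb]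
      rw [hfx] at hn
      rcases ih a hn with ⟨hras, _⟩ | ⟨hrab, hsa⟩
      · have hsa : s = a := root_unique f a s a hras (root_self f a ha)
        right
        refine ⟨?_, hsa⟩
        rw [hxb]; exact root_self f b hb
      · have : b = a := root_unique f a b a hrab (root_self f a ha)
        exact absurd this.symm hab
    · have e : updf f b a x = f x := by simp [updf, hxb]
      rw [e] at hn
      rcases ih (f x) hn with ⟨h1, h2⟩ | ⟨h1, h2⟩
      · exact Or.inl ⟨root_pre f x s h1, h2⟩
      · exact Or.inr ⟨root_pre f x b h1, h2⟩

theorem wlab_insert (p : PySem.Dict String String) (k v : String) :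
    wlab (p.insert k v) = updf (wlab p) k v := by
  funext x
  simp [wlab, updf, PySem.Dict.getD_insert]

theorem contains_of_lab_ne (p : PySem.Dict String String) (y : String) (h : ¬ wlab p y = y) :
    p.contains y = true := by
  by_contra hc
  exact h (PySem.Dict.getD_of_not_contains (d := p) (k := y) y (by simpa using hc))

theorem min_chain (p : PySem.Dict String String) (w r : String) (h : Root (wlab p) w r) :
    ∃ n, n ≤ p.size ∧ (wlab p)^[n] w = r ∧
      ∀ i < n, ¬ (wlab p) ((wlab p)^[i] w) = (wlab p)^[i] w := by
  classical
  obtain ⟨⟨n0, hn0⟩, hfr⟩ := h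
  have hex : ∃ n, (wlab p)^[n] w = r := ⟨n0, hn0⟩
  set g := wlab p with hg
  have hnofix : ∀ i < Nat.find hex, ¬ g (g^[i] w) = g^[i] w := by
    intro i hi hfix
    have e : g^[Nat.find hex] w = g^[i] w := by
      have e2 := Function.iterate_add_apply g (Nat.find hex - i) i w
      rw [Nat.sub_add_cancel (le_of_lt hi)] at e2
      rw [e2, Function.iterate_fixed hfix]
    exact Nat.find_min hex hi (e ▸ Nat.find_spec hex)
  have hinj : ∀ i < Nat.find hex, ∀ j < Nat.find hex, g^[i] w = g^[j] w → i = j := by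
    intro i hi j hj hf
    by_contra hne
    have key : ∀ i j, i < j → j < Nat.find hex → g^[i] w = g^[j] w → False := by
      intro i j hij hjN he
      have e2 := Function.iterate_add_apply g (Nat.find hex - j) j w
      rw [Nat.sub_add_cancel (le_of_lt hjN)] at e2
      have e3 : g^[(Nat.find hex - j) + i] w = r := by
        rw [Function.iterate_add_apply, he, ← e2]
        exact Nat.find_spec hex
      exact Nat.find_min hex (by omega) e3
    rcases Nat.lt_or_ge i j with h' | h'
    · exact key i j h' hj hf
    · exact key j i (by omega) hi hf.symm
  have hnd : ((List.range (Nat.find hex)).map (fun i => g^[i] w)).Nodup := by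
    refine List.Nodup.map_on ?_ List.nodup_range
    intro i hi j hj hf
    exact hinj i (List.mem_range.mp hi) j (List.mem_range.mp hj) hf
  have hsub : ((List.range (Nat.find hex)).map (fun i => g^[i] w)) ⊆ p.keys := by
    intro y hy
    simp only [List.mem_map, List.mem_range] at hy
    obtain ⟨i, hi, rfl⟩ := hy
    have := contains_of_lab_ne p (g^[i] w) (by rw [hg]; exact hnofix i hi)
    exact (PySem.Dict.contains_iff_mem_keys _ _).mp this
  have hlen : ((List.range (Nat.find hex)).map (fun i => g^[i] w)).length ≤ p.keys.length := by
    calc _ = ((List.range (Nat.find hex)).map (fun i => g^[i] w)).toFinset.card :=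
          (List.toFinset_card_of_nodup hnd).symm
      _ ≤ p.keys.toFinset.card := Finset.card_le_card (by
          intro x hx; simp only [List.mem_toFinset] at *; exact hsub hx)
      _ ≤ p.keys.length := List.toFinset_card_le _
  refine ⟨Nat.find hex, ?_, Nat.find_spec hex, hnofix⟩
  simpa [PySem.Dict.keys, PySem.Dict.size] using hlen

theorem findAux_spec (n : Nat) : ∀ (fu : Nat) (p : PySem.Dict String String) (w r : String),
    n < fu → (wlab p)^[n] w = r → wlab p r = r →
    (∀ i < n, ¬ (wlab p) ((wlab p)^[i] w) = (wlab p)^[i] w) →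
    (findAux fu p w).1 = r ∧
    (∀ x s, Root (wlab (findAux fu p w).2) x s ↔ Root (wlab p) x s) := by
  induction n with
  | zero =>
    intro fu p w r hfu hn hfix hnf
    obtain ⟨fu', rfl⟩ : ∃ fu', fu = fu' + 1 := ⟨fu - 1, by omega⟩
    simp only [Function.iterate_zero, id_eq] at hn
    subst hn
    have hlabw : wlab p w = w := hfix
    by_cases hc : p.contains w
    · have hred : findAux (fu' + 1) p w = (w, p) := by
        simp only [findAux, hc, if_true]
        rw [show p.getD w w = w from hlabw]
        simp
      rw [hred]
      exact ⟨rfl, fun x s => Iff.rfl⟩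
    · have hlab : wlab (p.insert w w) = wlab p := by
        rw [wlab_insert]
        funext x
        simp only [updf]
        by_cases hxw : x = w
        · rw [hxw, hlabw]; simp
        · simp [hxw]
      have hred : findAux (fu' + 1) p w = (w, p.insert w w) := by
        simp only [findAux, hc, Bool.false_eq_true, if_false]
        rw [show (p.insert w w).getD w w = w from PySem.Dict.getD_insert_self _ _ _ _]
        simp
      rw [hred]
      exact ⟨rfl, fun x s => by rw [hlab]⟩
  | succ m ih =>
    intro fu p w r hfu hn hfix hnf
    obtain ⟨fu', rfl⟩ : ∃ fu', fu = fu' + 1 := ⟨fu - 1, by omega⟩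
    have hw : ¬ wlab p w = w := by
      have := hnf 0 (Nat.succ_pos m)
      simpa using this
    have hc : p.contains w = true := contains_of_lab_ne p w hw
    have hred : findAux (fu' + 1) p w =
        (((findAux fu' p (p.getD w w)).2.insert w (findAux fu' p (p.getD w w)).1).getD w w,
          (findAux fu' p (p.getD w w)).2.insert w (findAux fu' p (p.getD w w)).1) := by
      simp only [findAux, hc, if_true]
      rw [if_pos (show w ≠ p.getD w w from fun h => hw h.symm)]
    rw [Function.iterate_succ_apply] at hn
    have hnf' : ∀ i < m, ¬ (wlab p) ((wlab p)^[i] (wlab p w)) = (wlab p)^[i] (wlab p w) := by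
      intro i hi
      have := hnf (i + 1) (by omega)
      rwa [Function.iterate_succ_apply] at this
    obtain ⟨h1, h2⟩ := ih fu' p (wlab p w) r (by omega) hn hfix hnf'
    have hgd : p.getD w w = wlab p w := rfl
    rw [hred]
    have hroot : Root (wlab (findAux fu' p (p.getD w w)).2) w r := by
      rw [hgd, h2]
      exact ⟨⟨m + 1, by rw [Function.iterate_succ_apply]; exact hn⟩, hfix⟩
    have h1' : (findAux fu' p (p.getD w w)).1 = r := by rw [hgd]; exact h1
    constructor
    · simp only [PySem.Dict.getD_insert_self]
      exact h1'
    · intro x s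
      rw [wlab_insert, h1']
      rw [comp_root_iff _ w r (h1' ▸ hroot) x s]
      rw [hgd, h2]

theorem sameRoot_iff_root (f : String → String) (x r u : String) (hx : Root f x r) :
    SameRoot f u x ↔ Root f u r := by
  constructor
  · rintro ⟨s, hu, hx'⟩
    rwa [root_unique f x r s hx hx']
  · intro hu; exact ⟨r, hu, hx⟩

theorem sameRoot_symm (f : String → String) (x y : String) (h : SameRoot f x y) : SameRoot f y x := by
  obtain ⟨r, h1, h2⟩ := h; exact ⟨r, h2, h1⟩

theorem sameRoot_trans (f : String → String) (x y z : String) (h1 : SameRoot f x y) (h2 : SameRoot f y z) : SameRoot f x z := by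
  obtain ⟨r, hx, hy⟩ := h1
  obtain ⟨s, hy', hz⟩ := h2
  rw [root_unique f y r s hy hy'] at hx
  exact ⟨s, hx, hz⟩

theorem sameRoot_link (f : String → String) (a b : String) (ha : f a = a) (hb : f b = b) (hab : a ≠ b)
    (u v : String) :
    SameRoot (updf f b a) u v ↔
      SameRoot f u v ∨ (Root f u a ∧ Root f v b) ∨ (Root f u b ∧ Root f v a) := by
  constructor
  · rintro ⟨s, hu, hv⟩
    rcases linkC f a b ha hb hab u s hu with ⟨hu', hsb⟩ | ⟨hu', hsa⟩
    · rcases linkC f a b ha hb hab v s hv with ⟨hv', _⟩ | ⟨hv', hsa⟩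
      · exact Or.inl ⟨s, hu', hv'⟩
      · rw [hsa] at hu'
        exact Or.inr (Or.inl ⟨hu', hv'⟩)
    · rcases linkC f a b ha hb hab v s hv with ⟨hv', _⟩ | ⟨hv', _⟩
      · rw [hsa] at hv'
        exact Or.inr (Or.inr ⟨hu', hv'⟩)
      · exact Or.inl ⟨b, hu', hv'⟩
  · rintro (⟨s, hu, hv⟩ | ⟨hu, hv⟩ | ⟨hu, hv⟩)
    · by_cases hsb : s = b
      · rw [hsb] at hu hv
        exact ⟨a, linkB f a b ha hab u hu, linkB f a b ha hab v hv⟩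
      · exact ⟨s, linkA f a b hb u s hu hsb, linkA f a b hb v s hv hsb⟩
    · exact ⟨a, linkA f a b hb u a hu hab, linkB f a b ha hab v hv⟩
    · exact ⟨a, linkB f a b ha hab u hu, linkA f a b hb v a hv hab⟩

theorem wf_of_equiv (f g : String → String) (h : ∀ x s, Root g x s ↔ Root f x s) (hf : WFr f) : WFr g := by
  intro x
  obtain ⟨r, hr⟩ := hf x
  exact ⟨r, (h x r).mpr hr⟩

theorem wf_link (f : String → String) (a b : String) (ha : f a = a) (hb : f b = b) (hab : a ≠ b)
    (hWF : WFr f) : WFr (updf f b a) := by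
  intro u
  obtain ⟨s, hs⟩ := hWF u
  by_cases hsb : s = b
  · rw [hsb] at hs
    exact ⟨a, linkB f a b ha hab u hs⟩
  · exact ⟨s, linkA f a b hb u s hs hsb⟩

theorem ufFind_spec (p : PySem.Dict String String) (w : String) (hWF : WFr (wlab p)) :
    Root (wlab p) w (ufFind p w).1 ∧
    (∀ x s, Root (wlab (ufFind p w).2) x s ↔ Root (wlab p) x s) := by
  obtain ⟨r, hr⟩ := hWF w
  obtain ⟨n, hle, hiter, hnf⟩ := min_chain p w r hr
  obtain ⟨h1, h2⟩ := findAux_spec n (p.size + 1) p w r (by omega) hiter hr.2 hnf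
  constructor
  · show Root (wlab p) w (findAux (p.size + 1) p w).1
    rw [h1]; exact hr
  · exact h2

theorem link_spec (p p2 : PySem.Dict String String) (x y r1 r2 a b : String)
    (hWF : WFr (wlab p))
    (hx : Root (wlab p) x r1) (hy : Root (wlab p) y r2)
    (hEq12 : ∀ u s, Root (wlab p2) u s ↔ Root (wlab p) u s)
    (hr12 : r1 ≠ r2)
    (hab : (a = r1 ∧ b = r2) ∨ (a = r2 ∧ b = r1)) :
    WFr (wlab (p2.insert b a)) ∧
    (∀ u v, SameRoot (wlab (p2.insert b a)) u v ↔
      (SameRoot (wlab p) u v ∨ (SameRoot (wlab p) u x ∧ SameRoot (wlab p) v y) ∨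
        (SameRoot (wlab p) u y ∧ SameRoot (wlab p) v x))) := by
  have hWF2 : WFr (wlab p2) := wf_of_equiv _ _ hEq12 hWF
  have hg2r1 : wlab p2 r1 = r1 := ((hEq12 r1 r1).mpr (root_self _ r1 hx.2)).2
  have hg2r2 : wlab p2 r2 = r2 := ((hEq12 r2 r2).mpr (root_self _ r2 hy.2)).2
  have hRu1 : ∀ u, Root (wlab p) u r1 ↔ SameRoot (wlab p) u x := fun u => (sameRoot_iff_root _ x r1 u hx).symm
  have hRu2 : ∀ u, Root (wlab p) u r2 ↔ SameRoot (wlab p) u y := fun u => (sameRoot_iff_root _ y r2 u hy).symm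
  have hsame : ∀ u v, SameRoot (wlab p2) u v ↔ SameRoot (wlab p) u v := by
    intro u v
    constructor
    · rintro ⟨s, h1, h2⟩; exact ⟨s, (hEq12 u s).mp h1, (hEq12 v s).mp h2⟩
    · rintro ⟨s, h1, h2⟩; exact ⟨s, (hEq12 u s).mpr h1, (hEq12 v s).mpr h2⟩
  have hlab : wlab (p2.insert b a) = updf (wlab p2) b a := wlab_insert p2 b a
  rcases hab with ⟨ha', hb'⟩ | ⟨ha', hb'⟩
  · subst ha'; subst hb'
    constructor
    · rw [hlab]; exact wf_link _ a b hg2r1 hg2r2 hr12 hWF2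
    · intro u v
      rw [hlab, sameRoot_link _ a b hg2r1 hg2r2 hr12 u v, hsame u v]
      simp only [hEq12, hRu1, hRu2]
  · subst ha'; subst hb'
    constructor
    · rw [hlab]; exact wf_link _ a b hg2r2 hg2r1 (Ne.symm hr12) hWF2
    · intro u v
      rw [hlab, sameRoot_link _ a b hg2r2 hg2r1 (Ne.symm hr12) u v, hsame u v]
      simp only [hEq12, hRu1, hRu2]
      tauto

set_option maxHeartbeats 1000000 in

set_option maxHeartbeats 1000000 in
theorem ufUnion_spec (p : PySem.Dict String String) (rk : PySem.Dict String Int) (x y : String)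
    (hWF : WFr (wlab p)) :
    WFr (wlab (ufUnion (p, rk) x y).1) ∧
    (∀ u v, SameRoot (wlab (ufUnion (p, rk) x y).1) u v ↔
      (SameRoot (wlab p) u v ∨ (SameRoot (wlab p) u x ∧ SameRoot (wlab p) v y) ∨
        (SameRoot (wlab p) u y ∧ SameRoot (wlab p) v x))) := by
  obtain ⟨hx, hEq1⟩ := ufFind_spec p x hWF
  have hWF1 : WFr (wlab (ufFind p x).2) := wf_of_equiv _ _ hEq1 hWF
  obtain ⟨hy1, hEq2⟩ := ufFind_spec (ufFind p x).2 y hWF1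
  have hy : Root (wlab p) y (ufFind (ufFind p x).2 y).1 := (hEq1 _ _).mp hy1
  have hEq12 : ∀ u s, Root (wlab (ufFind (ufFind p x).2 y).2) u s ↔ Root (wlab p) u s :=
    fun u s => (hEq2 u s).trans (hEq1 u s)
  have hWF2 : WFr (wlab (ufFind (ufFind p x).2 y).2) := wf_of_equiv _ _ hEq12 hWF
  set r1 := (ufFind p x).1 with hr1def
  set r2 := (ufFind (ufFind p x).2 y).1 with hr2def
  set p2 := (ufFind (ufFind p x).2 y).2 with hp2def
  by_cases hr12 : r1 ≠ r2
  · by_cases hrank : rk.getD r1 0 < rk.getD r2 0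
    · have hunion : (ufUnion (p, rk) x y).1 = p2.insert r1 r2 := by
        show (ufUnion (p, rk) x y).1 = _
        simp only [ufUnion, hp2def]
        rw [if_pos hr12, if_pos hrank]
      rw [hunion]
      exact link_spec p p2 x y r1 r2 r2 r1 hWF hx hy hEq12 hr12 (Or.inr ⟨rfl, rfl⟩)
    · have hunion : (ufUnion (p, rk) x y).1 = p2.insert r2 r1 := by
        show (ufUnion (p, rk) x y).1 = _
        simp only [ufUnion, hp2def]
        rw [if_pos hr12, if_neg hrank]
      rw [hunion]
      exact link_spec p p2 x y r1 r2 r1 r2 hWF hx hy hEq12 hr12 (Or.inl ⟨rfl, rfl⟩)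
  · have heq : r1 = r2 := not_ne_iff.mp hr12
    have hunion : (ufUnion (p, rk) x y).1 = p2 := by
      show (ufUnion (p, rk) x y).1 = _
      simp only [ufUnion, hp2def]
      rw [if_neg hr12]
    rw [hunion]
    have hy' : Root (wlab p) y r1 := by rw [heq]; exact hy
    have hxy : SameRoot (wlab p) x y := ⟨r1, hx, hy'⟩
    have hsame : ∀ u v, SameRoot (wlab p2) u v ↔ SameRoot (wlab p) u v := by
      intro u v
      constructor
      · rintro ⟨s, h1, h2⟩; exact ⟨s, (hEq12 u s).mp h1, (hEq12 v s).mp h2⟩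
      · rintro ⟨s, h1, h2⟩; exact ⟨s, (hEq12 u s).mpr h1, (hEq12 v s).mpr h2⟩
    refine ⟨hWF2, fun u v => ?_⟩
    rw [hsame u v]
    constructor
    · exact Or.inl
    · rintro (h | ⟨h1, h2⟩ | ⟨h1, h2⟩)
      · exact h
      · exact sameRoot_trans _ u y v (sameRoot_trans _ u x y h1 hxy) (sameRoot_symm _ v y h2)
      · exact sameRoot_trans _ u x v (sameRoot_trans _ u y x h1 (sameRoot_symm _ x y hxy)) (sameRoot_symm _ v x h2)

theorem rebuild_items (c : PySem.Dict String String) (hnd : c.keys.Nodup) (a b : String) :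
    (c.items.foldl (fun d kv => d.insert kv.1 (if kv.2 == b then a else kv.2)) PySem.Dict.empty).items
      = c.items.map (fun kv => (kv.1, if kv.2 == b then a else kv.2)) := by
  have h := PySem.Dict.items_foldl_insert_fresh (l := c.items) (k := fun kv => kv.1)
      (v := fun kv => if kv.2 == b then a else kv.2) (d := PySem.Dict.empty)
      (by intro q hq; simp [PySem.Dict.contains_empty]) (by exact hnd)
  simpa using h

theorem rebuild_keys (c : PySem.Dict String String) (hnd : c.keys.Nodup) (a b : String) :
    (c.items.foldl (fun d kv => d.insert kv.1 (if kv.2 == b then a else kv.2)) PySem.Dict.empty).keys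
      = c.keys := by
  show (c.items.foldl (fun d kv => d.insert kv.1 (if kv.2 == b then a else kv.2)) PySem.Dict.empty).items.map Prod.fst = c.items.map Prod.fst
  rw [rebuild_items c hnd a b, List.map_map]
  rfl

theorem rebuild_get? (c : PySem.Dict String String) (hnd : c.keys.Nodup) (a b : String) (k : String) :
    (c.items.foldl (fun d kv => d.insert kv.1 (if kv.2 == b then a else kv.2)) PySem.Dict.empty).get? k
      = (c.get? k).map (fun v => if v == b then a else v) := by
  set c1 := c.items.foldl (fun d kv => d.insert kv.1 (if kv.2 == b then a else kv.2)) PySem.Dict.empty with hc1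
  have hnd1 : c1.keys.Nodup := by rw [rebuild_keys c hnd a b]; exact hnd
  cases hk : c.get? k with
  | none =>
    have : k ∉ c.keys := (PySem.Dict.get?_eq_none_iff_not_mem_keys _ _).mp hk
    have : k ∉ c1.keys := by rwa [rebuild_keys c hnd a b]
    simp [(PySem.Dict.get?_eq_none_iff_not_mem_keys _ _).mpr this]
  | some v =>
    have hmem : (k, v) ∈ c.items := PySem.Dict.mem_items_of_get?_eq_some _ hk
    have hmem1 : (k, if v == b then a else v) ∈ c1.items := by
      rw [hc1, rebuild_items c hnd a b]
      exact List.mem_map.mpr ⟨(k, v), hmem, rfl⟩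
    simp [PySem.Dict.get?_of_mem_items _ hmem1 hnd1]

theorem wlab_eq_of_get?_some (c : PySem.Dict String String) (w v : String) (h : c.get? w = some v) :
    wlab c w = v := by
  simp [wlab, PySem.Dict.getD_eq_get?_getD, h]

theorem wlab_eq_of_get?_none (c : PySem.Dict String String) (w : String) (h : c.get? w = none) :
    wlab c w = w := by
  simp [wlab, PySem.Dict.getD_eq_get?_getD, h]

-- a b below are the labels of x and y; the final two inserts make the formula total

theorem mergeStep_nodup (c : PySem.Dict String String) (hnd : c.keys.Nodup) (x y : String) :
    (mergeStep c x y).keys.Nodup := by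
  simp only [mergeStep]
  split_ifs with h
  · exact PySem.Dict.nodup_keys_insert _ _ _ (PySem.Dict.nodup_keys_insert _ _ _ (by rw [rebuild_keys c hnd]; exact hnd))
  · exact PySem.Dict.nodup_keys_insert _ _ _ (PySem.Dict.nodup_keys_insert _ _ _ hnd)

theorem mergeStep_lab (c : PySem.Dict String String) (hnd : c.keys.Nodup) (hVC : VKc c)
    (x y w : String) :
    wlab (mergeStep c x y) w = (if wlab c w = wlab c y then wlab c x else wlab c w) := by
  have hax : wlab c x = c.getD x x := rfl
  have hby : wlab c y = c.getD y y := rfl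
  set a := c.getD x x with hadef
  set b := c.getD y y with hbdef
  have houter : ∀ (c1 : PySem.Dict String String),
      wlab ((c1.insert x a).insert y a) w = (if w = y then a else if w = x then a else wlab c1 w) := by
    intro c1
    simp [wlab, PySem.Dict.getD_insert]
  by_cases hab : a ≠ b
  · have hm : mergeStep c x y =
        ((c.items.foldl (fun d kv => d.insert kv.1 (if kv.2 == b then a else kv.2)) PySem.Dict.empty).insert x a).insert y a := by
      simp only [mergeStep]
      rw [if_pos hab]
    rw [hm, houter]
    by_cases hwy : w = y
    · rw [if_pos hwy, hwy, if_pos rfl]; exact hax.symm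
    · rw [if_neg hwy]
      by_cases hwx : w = x
      · rw [if_pos hwx, hwx, ite_self]; exact hax.symm
      · rw [if_neg hwx]
        have hg := rebuild_get? c hnd a b w
        cases hk : c.get? w with
        | some v =>
          have h1 : wlab c w = v := wlab_eq_of_get?_some c w v hk
          rw [hk] at hg
          have h2 : wlab (c.items.foldl (fun d kv => d.insert kv.1 (if kv.2 == b then a else kv.2)) PySem.Dict.empty) w
              = (if v == b then a else v) := by
            apply wlab_eq_of_get?_some
            simpa using hg
          rw [h2, h1, hby, hax]
          by_cases hvb : v = b
          · simp [hvb]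
          · simp [hvb]
        | none =>
          have h1 : wlab c w = w := wlab_eq_of_get?_none c w hk
          rw [hk] at hg
          have h2 : wlab (c.items.foldl (fun d kv => d.insert kv.1 (if kv.2 == b then a else kv.2)) PySem.Dict.empty) w = w := by
            apply wlab_eq_of_get?_none
            simpa using hg
          have hwb : w ≠ b := by
            intro hwb
            cases hy : c.get? y with
            | some u =>
              have : b = u := by
                rw [hbdef]
                simp [PySem.Dict.getD_eq_get?_getD, hy]
              have hcb : c.contains b = true := by rw [this]; exact hVC y u hy
              have : w ∈ c.keys := by
                rw [hwb]
                exact (PySem.Dict.contains_iff_mem_keys _ _).mp hcb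
              exact (PySem.Dict.get?_eq_none_iff_not_mem_keys _ _).mp hk this
            | none =>
              have hbyy : b = y := by
                rw [hbdef]
                simp [PySem.Dict.getD_eq_get?_getD, hy]
              exact hwy (hwb.trans hbyy)
          rw [h2, h1, hby, if_neg hwb]
  · have hab' : a = b := not_ne_iff.mp hab
    have hm : mergeStep c x y = ((c.insert x a).insert y a) := by
      simp only [mergeStep]
      rw [if_neg (by simpa using hab)]
    rw [hm, houter]
    by_cases hwy : w = y
    · rw [if_pos hwy, hwy, if_pos rfl]; exact hax.symm
    · rw [if_neg hwy]
      by_cases hwx : w = x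
      · rw [if_pos hwx, hwx, ite_self]; exact hax.symm
      · rw [if_neg hwx]
        by_cases h : wlab c w = wlab c y
        · rw [if_pos h, h, hby, ← hab', ← hax]
        · rw [if_neg h]

theorem mergeStep_VK (c : PySem.Dict String String) (hnd : c.keys.Nodup) (hVC : VKc c) (x y : String) :
    VKc (mergeStep c x y) := by
  intro k v hk
  -- the label a := c.getD x x is a key of the result, and old values stay keys
  have hca : ∀ z, c.contains z = true → (mergeStep c x y).contains z = true := by
    intro z hz
    simp only [mergeStep, PySem.Dict.contains_insert]
    split_ifs with h
    · have h1 : z ∈ c.keys := (PySem.Dict.contains_iff_mem_keys _ _).mp hz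
      have h2 : z ∈ (c.items.foldl (fun d kv => d.insert kv.1 (if kv.2 == c.getD y y then c.getD x x else kv.2)) PySem.Dict.empty).keys := by
        rwa [rebuild_keys c hnd]
      have h3 := (PySem.Dict.contains_iff_mem_keys _ _).mpr h2
      simp only [Bool.or_eq_true, beq_iff_eq] at h3 ⊢
      exact Or.inr (Or.inr h3)
    · simp [hz]
  have hka : (mergeStep c x y).contains (c.getD x x) = true := by
    cases hx : c.get? x with
    | some u =>
      have : c.getD x x = u := by simp [PySem.Dict.getD_eq_get?_getD, hx]
      rw [this]
      exact hca u (hVC x u hx)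
    | none =>
      have : c.getD x x = x := by simp [PySem.Dict.getD_eq_get?_getD, hx]
      rw [this]
      simp [mergeStep, PySem.Dict.contains_insert]
  -- now inspect where (k, v) came from
  simp only [mergeStep, PySem.Dict.get?_insert] at hk
  by_cases hky : k = y
  · rw [if_pos hky] at hk
    obtain rfl : c.getD x x = v := Option.some.inj hk
    exact hka
  · rw [if_neg hky] at hk
    by_cases hkx : k = x
    · rw [if_pos hkx] at hk
      obtain rfl : c.getD x x = v := Option.some.inj hk
      exact hka
    · rw [if_neg hkx] at hk
      by_cases hab : c.getD x x ≠ c.getD y y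
      · rw [if_pos hab, rebuild_get? c hnd _ _ k] at hk
        cases hc : c.get? k with
        | none => rw [hc] at hk; simp at hk
        | some u =>
          rw [hc] at hk
          simp only [Option.map_some] at hk
          obtain rfl : (if u == c.getD y y then c.getD x x else u) = v := Option.some.inj hk
          by_cases hub : u = c.getD y y
          · simpa [hub] using hka
          · rw [if_neg (by simpa using hub)]
            exact hca u (hVC k u hc)
      · rw [if_neg hab] at hk
        exact hca v (hVC k v hk)

theorem label_merge (la lb Lu Lv : String) :
    ((if Lu = lb then la else Lu) = (if Lv = lb then la else Lv)) ↔
      (Lu = Lv ∨ (Lu = la ∧ Lv = lb) ∨ (Lu = lb ∧ Lv = la)) := by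
  by_cases h1 : Lu = lb <;> by_cases h2 : Lv = lb <;>
    simp only [h1, h2, if_pos, if_false] <;>
    constructor <;> intro h <;> try tauto

theorem sameRoot_of_equiv (f g : String → String) (h : ∀ x s, Root g x s ↔ Root f x s) (u v : String) :
    SameRoot g u v ↔ SameRoot f u v := by
  constructor
  · rintro ⟨s, h1, h2⟩; exact ⟨s, (h u s).mp h1, (h v s).mp h2⟩
  · rintro ⟨s, h1, h2⟩; exact ⟨s, (h u s).mpr h1, (h v s).mpr h2⟩

theorem step_inv (p : PySem.Dict String String) (rk : PySem.Dict String Int)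
    (c : PySem.Dict String String) (x y : String) (h : InvPC p c) :
    InvPC (ufUnion (p, rk) x y).1 (mergeStep c x y) := by
  obtain ⟨hWF, hVC, hnd, hS⟩ := h
  obtain ⟨hWF', hSame⟩ := ufUnion_spec p rk x y hWF
  refine ⟨hWF', mergeStep_VK c hnd hVC x y, mergeStep_nodup c hnd x y, ?_⟩
  intro u v
  rw [hSame u v, mergeStep_lab c hnd hVC x y u, mergeStep_lab c hnd hVC x y v,
    label_merge, hS u v, hS u x, hS v y, hS u y, hS v x]

theorem fold_inv (pairs : List (List String)) :
    ∀ (st : PySem.Dict String String × PySem.Dict String Int) (c : PySem.Dict String String),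
      InvPC st.1 c →
      InvPC (pairs.foldl (fun st pr => match pr with | [a, b] => ufUnion st a b | _ => st) st).1
            (pairs.foldl (fun c pr => match pr with
              | [] => c
              | x :: t => (match t with
                | [] => c
                | y :: u => (match u with
                  | [] => mergeStep c x y
                  | _ :: _ => c))) c) := by
  induction pairs with
  | nil => intro st c h; exact h
  | cons pr rest ih =>
    intro st c h
    simp only [List.foldl_cons]
    match pr with
    | [] => exact ih st c h
    | [a] => exact ih st c h
    | [a, b] => exact ih (ufUnion st a b) (mergeStep c a b) (step_inv st.1 st.2 c a b h)
    | a :: b :: d :: t => exact ih st c h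

theorem root_id (x r : String) : Root id x r ↔ r = x := by
  constructor
  · rintro ⟨⟨n, hn⟩, _⟩
    rw [Function.iterate_id, id_eq] at hn
    exact hn.symm
  · intro hrx
    rw [hrx]
    exact root_self id x rfl

theorem init_inv : InvPC PySem.Dict.empty PySem.Dict.empty := by
  have hlab : wlab (PySem.Dict.empty : PySem.Dict String String) = id := by
    funext z
    simp [wlab, PySem.Dict.getD_empty]
  refine ⟨?_, ?_, ?_, ?_⟩
  · rw [hlab]; intro z; exact ⟨z, root_self id z rfl⟩
  · intro k v h
    rw [PySem.Dict.get?_empty] at h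
    cases h
  · exact PySem.Dict.nodup_keys_empty
  · intro u v
    rw [hlab]
    constructor
    · rintro ⟨r, h1, h2⟩
      rw [(root_id u r).mp h1] at h2
      have := (root_id v u).mp h2
      simp [this]
    · intro h
      have huv : u = v := by simpa [wlab, PySem.Dict.getD_empty] using h
      exact ⟨u, root_self id u rfl, by rw [huv]; exact root_self id v rfl⟩

theorem elem_iff (p c : PySem.Dict String String) (h : InvPC p c) (x y : String) :
    (x == y ||
      (match c.get? x, c.get? y with
       | some lx, some ly => lx == ly
       | _, _ => false)) = true ↔ SameRoot (wlab p) x y := by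
  obtain ⟨hWF, hVC, hnd, hS⟩ := h
  by_cases hxy : x = y
  · subst hxy
    obtain ⟨r, hr⟩ := hWF x
    have hrefl : SameRoot (wlab p) x x := ⟨r, hr, hr⟩
    simp [hrefl]
  · rw [hS x y]
    have hne : (x == y) = false := by simpa using hxy
    rw [hne, Bool.false_or]
    cases hx : c.get? x with
    | some lx =>
      have hlx : wlab c x = lx := wlab_eq_of_get?_some c x lx hx
      cases hy : c.get? y with
      | some ly =>
        have hly : wlab c y = ly := wlab_eq_of_get?_some c y ly hy
        simp [hlx, hly]
      | none =>
        have hly : wlab c y = y := wlab_eq_of_get?_none c y hy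
        have hmem : lx ∈ c.keys := (PySem.Dict.contains_iff_mem_keys _ _).mp (hVC x lx hx)
        have hymem : y ∉ c.keys := (PySem.Dict.get?_eq_none_iff_not_mem_keys _ _).mp hy
        have : lx ≠ y := fun hc => hymem (hc ▸ hmem)
        simp [hlx, hly, this]
    | none =>
      have hlx : wlab c x = x := wlab_eq_of_get?_none c x hx
      have hxmem : x ∉ c.keys := (PySem.Dict.get?_eq_none_iff_not_mem_keys _ _).mp hx
      cases hy : c.get? y with
      | some ly =>
        have hly : wlab c y = ly := wlab_eq_of_get?_some c y ly hy
        have hmem : ly ∈ c.keys := (PySem.Dict.contains_iff_mem_keys _ _).mp (hVC y ly hy)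
        have : x ≠ ly := fun hc => hxmem (hc ▸ hmem)
        simp [hlx, hly, this]
      | none =>
        have hly : wlab c y = y := wlab_eq_of_get?_none c y hy
        simp [hlx, hly, hxy]

theorem checkAll_eq (l : List (String × String)) :
    ∀ (p c : PySem.Dict String String), InvPC p c →
      checkAll p l = l.all (fun q =>
        q.1 == q.2 ||
          (match c.get? q.1, c.get? q.2 with
           | some lx, some ly => lx == ly
           | _, _ => false)) := by
  induction l with
  | nil => intro p c _; rfl
  | cons q rest ih =>
    obtain ⟨qa, qb⟩ := q
    intro p c h
    have h' := h
    obtain ⟨hWF, hVC, hnd, hS⟩ := h'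
    obtain ⟨hr1, hEq1⟩ := ufFind_spec p qa hWF
    have hWF1 : WFr (wlab (ufFind p qa).2) := wf_of_equiv _ _ hEq1 hWF
    obtain ⟨hr2p, hEq2⟩ := ufFind_spec (ufFind p qa).2 qb hWF1
    have hr2 : Root (wlab p) qb (ufFind (ufFind p qa).2 qb).1 := (hEq1 _ _).mp hr2p
    have hEq12 : ∀ u s, Root (wlab (ufFind (ufFind p qa).2 qb).2) u s ↔ Root (wlab p) u s :=
      fun u s => (hEq2 u s).trans (hEq1 u s)
    have hInv2 : InvPC (ufFind (ufFind p qa).2 qb).2 c := by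
      refine ⟨wf_of_equiv _ _ hEq12 hWF, hVC, hnd, ?_⟩
      intro u v
      rw [sameRoot_of_equiv _ _ hEq12 u v]
      exact hS u v
    have hiff : ((ufFind p qa).1 == (ufFind (ufFind p qa).2 qb).1) = true ↔ SameRoot (wlab p) qa qb := by
      constructor
      · intro he
        have : (ufFind p qa).1 = (ufFind (ufFind p qa).2 qb).1 := by simpa using he
        exact ⟨(ufFind (ufFind p qa).2 qb).1, this ▸ hr1, hr2⟩
      · rintro ⟨s, h1, h2⟩
        have e1 := root_unique _ qa _ s hr1 h1
        have e2 := root_unique _ qb _ s hr2 h2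
        simp [e1, e2]
    have hstep : checkAll p ((qa, qb) :: rest) =
        (if (ufFind p qa).1 == (ufFind (ufFind p qa).2 qb).1 then
          checkAll (ufFind (ufFind p qa).2 qb).2 rest else false) := rfl
    rw [hstep, List.all_cons]
    by_cases hc : ((ufFind p qa).1 == (ufFind (ufFind p qa).2 qb).1) = true
    · rw [if_pos hc]
      have helem := (elem_iff p c h qa qb).mpr (hiff.mp hc)
      rw [ih _ c hInv2]
      simp only [helem, Bool.true_and]
    · rw [if_neg hc]
      have helem : (qa == qb ||
        (match c.get? qa, c.get? qb with
         | some lx, some ly => lx == ly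
         | _, _ => false)) = false := by
        cases hcase : (qa == qb ||
          (match c.get? qa, c.get? qb with
           | some lx, some ly => lx == ly
           | _, _ => false)) with
        | false => rfl
        | true =>
          have := (elem_iff p c h qa qb).mp hcase
          exact absurd (hiff.mpr this) hc
      simp [helem]

-- ===== VERDICT (by name: the statement is the Claim_ definition above) =====
theorem areSentencesSimilarTwo_spec : Claim_equal_areSentencesSimilarTwo := by
  intro words1 words2 pairs _ _
  unfold Spec_areSentencesSimilarTwo areSentencesSimilarTwo areSentencesSimilarTwo_alt
  by_cases h1 : words1.length ≠ words2.length
  · rw [if_pos h1, if_pos h1]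
  · rw [if_neg h1, if_neg h1]
    by_cases h2 : words1 = [] ∧ words2 = []
    · rw [if_pos h2, if_pos h2]
    · rw [if_neg h2, if_neg h2]
      by_cases h3 : words1 = words2
      · rw [if_pos h3, if_pos h3]
      · rw [if_neg h3, if_neg h3]
        exact checkAll_eq (words1.zip words2) _ _
          (fold_inv pairs (PySem.Dict.empty, PySem.Dict.empty) PySem.Dict.empty init_inv)
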